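-- pv_equiv track=rewrite | github.com/ricsinaruto/brain-forecast | legacy/models/cosmos.py | _factor_to_strides
-- ===== SOURCE A (Python) =====
-- import math
--
-- def _factor_to_strides(factor: int, depth: int) -> list[int]:
--     """Decompose a compression factor into a list of stride-2 steps."""
--     strides: list[int] = []
--     remaining = max(1, int(factor))
--     for _ in range(depth):
--         if remaining >= 2:
--             strides.append(2)
--             remaining = math.ceil(remaining / 2)
--         else:
--             strides.append(1)
--     return strides
-- ===== SOURCE B (Python) =====
-- def _factor_to_strides(factor: int, depth: int) -> list[int]:
--     """Decompose a compression factor into a list of stride-2 steps."""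
--     k = (max(1, int(factor)) - 1).bit_length()
--     d = max(0, depth)
--     n = min(k, d)
--     return [2] * n + [1] * (d - n)
-- ===== Notes on version B (the rewrite author's own statement) =====
-- stated objective: simpler
-- what changed: Replaced the loop that repeatedly ceil-halves the remaining factor with a closed form: the number of stride-2 steps is bit_length(max(1,factor)-1), clamped to depth, followed by list replication.
import Mathlib
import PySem

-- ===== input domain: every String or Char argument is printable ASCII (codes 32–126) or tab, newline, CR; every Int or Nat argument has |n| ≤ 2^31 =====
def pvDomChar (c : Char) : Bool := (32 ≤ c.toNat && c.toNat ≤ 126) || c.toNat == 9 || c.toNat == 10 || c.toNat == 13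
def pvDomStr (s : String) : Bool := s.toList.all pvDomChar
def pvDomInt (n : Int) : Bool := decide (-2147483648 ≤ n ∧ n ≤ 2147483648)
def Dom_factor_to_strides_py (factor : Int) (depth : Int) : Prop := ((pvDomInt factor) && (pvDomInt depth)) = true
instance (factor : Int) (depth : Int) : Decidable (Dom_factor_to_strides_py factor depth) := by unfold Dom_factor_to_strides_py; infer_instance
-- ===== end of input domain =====

-- B replaces A's ceil-halving loop with a closed form: bit_length(max(1,factor)-1) stride-2 steps
-- (clamped to depth) followed by 1s; objective: simpler (no loop state).

-- ===== PORT A =====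
-- the 'for _ in range(depth)' loop; math.ceil(remaining / 2) = (remaining + 1) / 2 exactly,
-- since remaining ≥ 2 here (positive Int, so Lean's Euclidean division agrees with Python's floor).
def pvALoop : Nat → Int → List Int → List Int
  | 0, _, strides => strides
  | Nat.succ n, remaining, strides =>
    if remaining ≥ 2 then pvALoop n ((remaining + 1) / 2) (strides ++ [2])
    else pvALoop n remaining (strides ++ [1])

def factor_to_strides_py (factor : Int) (depth : Int) : List Int :=
  -- range(depth) iterates depth.toNat times (empty for depth ≤ 0); int(factor) is the identity on int
  pvALoop depth.toNat (max 1 factor) []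

-- ===== PORT B =====
-- Python's (nonnegative) int.bit_length is Nat.size
def factor_to_strides_py_alt (factor : Int) (depth : Int) : List Int :=
  let k : Int := (Nat.size (max 1 factor - 1).toNat : Int)
  let d : Int := max 0 depth
  let n : Int := min k d
  List.replicate n.toNat 2 ++ List.replicate (d - n).toNat 1

-- ===== PRECONDITION & SPEC =====
def Spec_factor_to_strides_py (factor : Int) (depth : Int) (out : List Int) : Prop := out = factor_to_strides_py_alt factor depth
instance (factor : Int) (depth : Int) (out : List Int) : Decidable (Spec_factor_to_strides_py factor depth out) := by unfold Spec_factor_to_strides_py; infer_instance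

-- ===== CLAIM (what is proved, stated in full; the proofs are below) =====
def Claim_equal_factor_to_strides_py : Prop := ∀ (factor : Int) (depth : Int), Dom_factor_to_strides_py factor depth → Spec_factor_to_strides_py factor depth (factor_to_strides_py factor depth)

-- ===== LEMMAS AND PROOFS =====

-- one ceil-halving step strips one bit: size m = size (m / 2) + 1 for m ≥ 1
theorem pv_size_step (m : Nat) (hm : 1 ≤ m) : Nat.size m = Nat.size (m / 2) + 1 := by
  apply le_antisymm
  · rw [Nat.size_le]
    have h := Nat.lt_size_self (m / 2)
    have : 2 ^ (Nat.size (m / 2) + 1) = 2 * 2 ^ (Nat.size (m / 2)) := by ring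
    omega
  · have h1 : 1 ≤ Nat.size m := Nat.size_pos.2 (by omega)
    have h := Nat.lt_size_self m
    have h2 : Nat.size (m / 2) ≤ Nat.size m - 1 := by
      rw [Nat.size_le]
      have : 2 ^ Nat.size m = 2 * 2 ^ (Nat.size m - 1) := by
        rw [← pow_succ']
        congr 1
        omega
      omega
    omega

theorem pv_loop_eq (n : Nat) : ∀ (r : Int) (acc : List Int), 1 ≤ r →
    pvALoop n r acc =
      acc ++ List.replicate (min (Nat.size (r - 1).toNat) n) 2
          ++ List.replicate (n - min (Nat.size (r - 1).toNat) n) 1 := by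
  induction n with
  | zero => intro r acc _; simp [pvALoop]
  | succ n ih =>
    intro r acc hr
    by_cases h2 : r ≥ 2
    · have hstep : pvALoop (n + 1) r acc = pvALoop n ((r + 1) / 2) (acc ++ [2]) := by
        simp [pvALoop, h2]
      rw [hstep, ih ((r + 1) / 2) (acc ++ [2]) (by omega)]
      have hdiv : ((r + 1) / 2 - 1).toNat = (r - 1).toNat / 2 := by omega
      have hsz : Nat.size (r - 1).toNat = Nat.size ((r - 1).toNat / 2) + 1 :=
        pv_size_step _ (by omega)
      rw [hdiv]
      have hmin : min (Nat.size (r - 1).toNat) (n + 1) = min (Nat.size ((r - 1).toNat / 2)) n + 1 := by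
        omega
      rw [hmin]
      simp [List.replicate_succ, Nat.succ_sub_succ, List.append_assoc]
    · have hr1 : r = 1 := by omega
      subst hr1
      have hstep : pvALoop (n + 1) 1 acc = pvALoop n 1 (acc ++ [1]) := by
        simp [pvALoop]
      rw [hstep, ih 1 (acc ++ [1]) (by omega)]
      simp [List.replicate_succ]

-- ===== VERDICT (by name: the statement is the Claim_ definition above) =====
theorem factor_to_strides_py_spec : Claim_equal_factor_to_strides_py := by
  intro factor depth _
  unfold Spec_factor_to_strides_py factor_to_strides_py factor_to_strides_py_alt
  rw [pv_loop_eq depth.toNat (max 1 factor) [] (by omega)]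
  generalize (max 1 factor - 1).toNat.size = s
  simp only [List.nil_append]
  have h1 : (min (s : Int) (max 0 depth)).toNat = min s depth.toNat := by omega
  have h2 : (max 0 depth - min (s : Int) (max 0 depth)).toNat = depth.toNat - min s depth.toNat := by omega
  rw [h1, h2]
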